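-- pv_equiv track=rewrite | github.com/helineva/advent-of-code-2023 | 12/aoc2023_day12_part1.py | fill_row
-- ===== SOURCE A (Python) =====
-- def fill_row(r, s):
--     """replaces ?'s in a row r by characters in s"""
--     output = []
--     i = 0
--     for c in r:
--         if c == "?":
--             output.append(s[i])
--             i += 1
--         else:
--             output.append(c)
--     return "".join(output)
-- ===== SOURCE B (Python) =====
-- def fill_row(r, s):
--     """replaces ?'s in a row r by characters in s"""
--     parts = r.split("?")
--     return parts[0] + "".join(c + p for c, p in zip(s, parts[1:]))
-- ===== Notes on version B (the rewrite author's own statement) =====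
-- stated objective: idiomatic
-- what changed: B splits r on '?' once and stitches the segments back together with the replacement characters via zip+join, instead of A's character-by-character loop with an explicit counter into s.
import Mathlib
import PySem

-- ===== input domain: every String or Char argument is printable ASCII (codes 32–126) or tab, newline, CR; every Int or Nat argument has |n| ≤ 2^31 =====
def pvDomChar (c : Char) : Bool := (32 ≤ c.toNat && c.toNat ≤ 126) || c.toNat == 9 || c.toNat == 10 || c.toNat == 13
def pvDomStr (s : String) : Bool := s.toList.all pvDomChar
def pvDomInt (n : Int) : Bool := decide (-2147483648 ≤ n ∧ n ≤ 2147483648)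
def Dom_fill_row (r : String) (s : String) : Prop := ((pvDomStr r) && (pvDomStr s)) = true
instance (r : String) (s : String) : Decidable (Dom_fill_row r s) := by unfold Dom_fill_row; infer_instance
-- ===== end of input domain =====

-- B replaces A's character-by-character loop (with a counter into s) by a single split on '?'
-- stitched back together with the replacement characters (zip + join); objective: idiomatic.

-- ===== PORT A =====
-- literal port of A's loop: state = (output, i); s[i] is pyGetD under Pre_ (IndexError = out of range);
-- output collects one character per append, so "".join(output) is String.ofList of the collected chars
def fill_row (r : String) (s : String) : String :=
  String.ofList (r.toList.foldl
    (fun (st : List Char × Int) c =>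
      if c = '?' then (st.1 ++ [PySem.List.pyGetD s.toList st.2 ' '], st.2 + 1)
      else (st.1 ++ [c], st.2)) ([], 0)).1

-- ===== PORT B =====
-- literal port of Source B: parts = r.split("?"); return parts[0] + "".join(c + p for c, p in zip(s, parts[1:]))
-- (helper takes the once-computed parts, like the Python local variable)
def fill_row_alt_core (parts : List (List Char)) (s : List Char) : List Char :=
  PySem.List.pyGetD parts 0 [] ++
    PySem.Chars.join [] ((s.zip (PySem.List.slice parts (some 1) none)).map (fun cp => cp.1 :: cp.2))

def fill_row_alt (r : String) (s : String) : String :=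
  String.ofList (fill_row_alt_core (PySem.Chars.splitOn r.toList ['?']) s.toList)

-- ===== PRECONDITION & SPEC =====
-- Pre_ excludes exactly the inputs where r has more '?' than s has characters: there A raises IndexError on s[i].
def Pre_fill_row (r : String) (s : String) : Prop := r.toList.count '?' ≤ s.toList.length
instance (r : String) (s : String) : Decidable (Pre_fill_row r s) := by unfold Pre_fill_row; infer_instance
def pvWitness_fill_row : String × String := ("a?b", "x")

def Spec_fill_row (r : String) (s : String) (out : String) : Prop := out = fill_row_alt r s
instance (r : String) (s : String) (out : String) : Decidable (Spec_fill_row r s out) := by unfold Spec_fill_row; infer_instance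

-- ===== CLAIM (what is proved, stated in full; the proofs are below) =====
def Claim_equal_fill_row : Prop := ∀ (r : String) (s : String), Dom_fill_row r s → Pre_fill_row r s → Spec_fill_row r s (fill_row r s)

-- ===== LEMMAS AND PROOFS =====

-- reference semantics: fill r from the front of t, one char per '?'
def fillF : List Char → List Char → List Char
  | [], _ => []
  | c :: r, t => if c = '?' then t.headD ' ' :: fillF r t.tail else c :: fillF r t

-- reference form of r.split("?") on lists of chars
def qparts : List Char → List (List Char)
  | [] => [[]]
  | c :: r =>
    if c = '?' then [] :: qparts r
    else
      match qparts r with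
      | [] => [[c]]  -- unreachable: qparts never returns []
      | p :: ps => (c :: p) :: ps

theorem qparts_ne_nil (l : List Char) : qparts l ≠ [] := by
  cases l with
  | nil => simp [qparts]
  | cons c r =>
    simp only [qparts]
    split <;> try simp
    split <;> simp

theorem go_eq_qparts : ∀ (fuel : Nat) (l cur : List Char) (acc : List (List Char))
    (_ : l.length < fuel),
    PySem.Chars.splitOn.go ['?'] fuel l cur acc
      = acc.reverse ++ (qparts l).modifyHead (cur.reverse ++ ·) := by
  intro fuel
  induction fuel with
  | zero => intro l cur acc h; omega
  | succ fuel ih =>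
    intro l cur acc h
    cases l with
    | nil =>
      show (cur.reverse :: acc).reverse = _
      simp [qparts]
    | cons c rest =>
      have step : PySem.Chars.splitOn.go ['?'] (fuel + 1) (c :: rest) cur acc
          = if ['?'].isPrefixOf (c :: rest) = true
            then PySem.Chars.splitOn.go ['?'] fuel rest [] (cur.reverse :: acc)
            else PySem.Chars.splitOn.go ['?'] fuel rest (c :: cur) acc := rfl
      rw [step]
      cases hb : (['?'].isPrefixOf (c :: rest)) with
      | true =>
        have hc : c = '?' := by
          simp [List.isPrefixOf] at hb; exact hb.symm
        subst hc
        rw [if_pos rfl]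
        rw [ih rest [] (cur.reverse :: acc) (by simp at h ⊢; omega)]
        rcases hq : qparts rest with _ | ⟨p, ps⟩
        · exact absurd hq (qparts_ne_nil rest)
        · simp [qparts, hq]
      | false =>
        have hc : c ≠ '?' := by
          intro hcc; subst hcc; simp [List.isPrefixOf] at hb
        rw [if_neg (by simp)]
        rw [ih rest (c :: cur) acc (by simp at h ⊢; omega)]
        rcases hq : qparts rest with _ | ⟨p, ps⟩
        · exact absurd hq (qparts_ne_nil rest)
        · simp [qparts, hq, hc, List.append_assoc]

theorem splitOn_eq_qparts (l : List Char) : PySem.Chars.splitOn l ['?'] = qparts l := by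
  unfold PySem.Chars.splitOn
  rw [go_eq_qparts (l.length + 1) l [] [] (by omega)]
  rcases hq : qparts l with _ | ⟨p, ps⟩
  · exact absurd hq (qparts_ne_nil l)
  · simp

theorem join_nil_flatten (ps : List (List Char)) : PySem.Chars.join [] ps = ps.flatten := by
  induction ps with
  | nil => simp [PySem.Chars.join, List.intercalate]
  | cons p ps ih =>
    cases ps with
    | nil => simp [PySem.Chars.join, List.intercalate]
    | cons q qs =>
      simp only [PySem.Chars.join, List.intercalate, List.intersperse] at ih ⊢
      simp_all

theorem getD_eq_headD_drop (xs : List Char) (n : Nat) (d : Char) :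
    xs.getD n d = (xs.drop n).headD d := by
  simp [List.getD, List.head?_drop]

theorem fillA_loop (s : List Char) : ∀ (r out : List Char) (n : Nat),
    r.foldl (fun (st : List Char × Int) c =>
        if c = '?' then (st.1 ++ [PySem.List.pyGetD s st.2 ' '], st.2 + 1)
        else (st.1 ++ [c], st.2)) (out, (n : Int))
      = (out ++ fillF r (s.drop n), ((n + r.count '?' : Nat) : Int)) := by
  intro r
  induction r with
  | nil => intro out n; simp [fillF]
  | cons c r ih =>
    intro out n
    by_cases hc : c = '?'
    · subst hc
      simp only [List.foldl_cons, reduceIte, PySem.List.pyGetD_natCast]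
      have h1 : ((n : Int) + 1) = ((n + 1 : Nat) : Int) := by push_cast; ring
      rw [h1, ih (out ++ [s.getD n ' ']) (n + 1)]
      simp only [fillF, reduceIte]
      rw [getD_eq_headD_drop, List.tail_drop]
      refine Prod.ext ?_ ?_
      · simp [List.append_assoc]
      · simp only [List.count_cons]; push_cast; simp; ring
    · simp only [List.foldl_cons, if_neg hc]
      rw [ih (out ++ [c]) n]
      simp only [fillF, if_neg hc]
      refine Prod.ext ?_ ?_
      · simp [List.append_assoc]
      · simp [hc]

theorem fillB_eq : ∀ (r s : List Char), r.count '?' ≤ s.length →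
    (qparts r).headD [] ++ ((s.zip (qparts r).tail).map (fun cp => cp.1 :: cp.2)).flatten
      = fillF r s := by
  intro r
  induction r with
  | nil => intro s h; simp [qparts, fillF]
  | cons c r ih =>
    intro s h
    by_cases hc : c = '?'
    · subst hc
      have hcnt : r.count '?' + 1 ≤ s.length := by
        simpa [List.count_cons] using h
      cases s with
      | nil => simp at hcnt
      | cons a s' =>
        rcases hq : qparts r with _ | ⟨p, ps⟩
        · exact absurd hq (qparts_ne_nil r)
        · have ihr := ih s' (by simp at hcnt; omega)
          rw [hq, List.headD_cons, List.tail_cons] at ihr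
          have hq1 : qparts ('?' :: r) = [] :: p :: ps := by simp [qparts, hq]
          rw [hq1, List.headD_cons, List.tail_cons, List.zip_cons_cons, List.map_cons,
            List.flatten_cons]
          have hF : fillF ('?' :: r) (a :: s') = a :: fillF r s' := by
            simp [fillF]
          rw [hF, List.nil_append, List.cons_append]
          exact congrArg (a :: ·) ihr
    · rcases hq : qparts r with _ | ⟨p, ps⟩
      · exact absurd hq (qparts_ne_nil r)
      · have ihr := ih s (by simpa [List.count_cons, hc] using h)
        rw [hq, List.headD_cons, List.tail_cons] at ihr
        have hq1 : qparts (c :: r) = (c :: p) :: ps := by simp [qparts, hq, hc]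
        rw [hq1, List.headD_cons, List.tail_cons]
        have hF : fillF (c :: r) s = c :: fillF r s := by
          simp [fillF, hc]
        rw [hF, List.cons_append]
        exact congrArg (c :: ·) ihr

-- ===== VERDICT (by name: the statement is the Claim_ definition above) =====
theorem fill_row_spec : Claim_equal_fill_row := by
  intro r s _ hpre
  unfold Spec_fill_row fill_row fill_row_alt fill_row_alt_core
  have hA := fillA_loop s.toList r.toList [] 0
  simp only [Nat.cast_zero] at hA
  rw [hA]
  rw [splitOn_eq_qparts, PySem.List.slice_from_one, join_nil_flatten]
  rcases hq : qparts r.toList with _ | ⟨p, ps⟩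
  · exact absurd hq (qparts_ne_nil r.toList)
  · have hb := fillB_eq r.toList s.toList hpre
    rw [hq, List.headD_cons, List.tail_cons] at hb
    simp only [PySem.List.pyGetD_zero_cons, List.tail_cons, List.nil_append, List.drop_zero]
    rw [hb]
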